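-- pv_equiv track=rewrite | github.com/a01376331/Mision-09 | Mision_09.py | calcularSuma
-- ===== SOURCE A (Python) =====
-- def calcularSuma(lista): # Función que regresa la suma de todos los números que no son o están alado de un 13.
--     x = [i for i, j in enumerate(lista) if j == 13]
--     suma = 0
--     indicesPorSaltar = []
--     for k in x:
--         indicesPorSaltar.append(k - 1)
--         indicesPorSaltar.append(k)
--         indicesPorSaltar.append(k + 1)
--     for n in range(len(lista)):
--         if n in indicesPorSaltar:
--             continue
--         suma += lista[n]
--     return suma
-- ===== SOURCE B (Python) =====
-- def calcularSuma(lista):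
--     total = 0
--     n = len(lista)
--     for i in range(n):
--         skip = (lista[i] == 13
--                 or (i > 0 and lista[i-1] == 13)
--                 or (i < n - 1 and lista[i+1] == 13))
--         if not skip:
--             total += lista[i]
--     return total
-- ===== Notes on version B (the rewrite author's own statement) =====
-- stated objective: simpler
-- what changed: Replaces the three-stage find-13s / build-skip-index-list / sum-with-list-membership structure by one pass that checks each element and its two guarded neighbors directly.
import Mathlib
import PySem

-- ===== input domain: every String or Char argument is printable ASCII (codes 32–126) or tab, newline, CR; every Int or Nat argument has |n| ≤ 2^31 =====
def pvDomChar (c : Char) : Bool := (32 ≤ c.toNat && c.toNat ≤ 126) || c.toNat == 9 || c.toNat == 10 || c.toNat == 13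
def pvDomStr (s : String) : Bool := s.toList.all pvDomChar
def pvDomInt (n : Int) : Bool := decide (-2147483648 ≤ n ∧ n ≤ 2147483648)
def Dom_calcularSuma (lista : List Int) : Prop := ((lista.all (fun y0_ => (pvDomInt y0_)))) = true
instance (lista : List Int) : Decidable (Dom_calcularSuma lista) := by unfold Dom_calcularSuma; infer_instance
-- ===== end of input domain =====

-- B replaces A's three-stage find-13s / skip-index-list / membership-tested sum by a single
-- guarded neighbor-checking pass (objective: simpler).


-- ===== PORT A =====
def calcularSuma (lista : List Int) : Int :=
  -- x = [i for i, j in enumerate(lista) if j == 13]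
  let x : List Int :=
    ((PySem.List.enumerate lista).filter (fun p => p.2 == 13)).map (fun p => p.1)
  -- indicesPorSaltar built by three appends per k
  let indicesPorSaltar : List Int :=
    x.foldl (fun acc k => acc ++ [k - 1] ++ [k] ++ [k + 1]) []
  -- for n in range(len(lista)): if n in indicesPorSaltar: continue; suma += lista[n]
  (PySem.List.pyRange 0 (lista.length : Int) 1).foldl
    (fun suma n =>
      if n ∈ indicesPorSaltar then suma
      else suma + PySem.List.pyGetD lista n 0) 0

-- ===== PORT B =====
def calcularSuma_alt (lista : List Int) : Int :=
  let n : Int := (lista.length : Int)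
  (PySem.List.pyRange 0 n 1).foldl
    (fun total i =>
      let skip : Bool :=
        (PySem.List.pyGetD lista i 0 == 13)
        || (decide (i > 0) && (PySem.List.pyGetD lista (i - 1) 0 == 13))
        || (decide (i < n - 1) && (PySem.List.pyGetD lista (i + 1) 0 == 13))
      if skip then total else total + PySem.List.pyGetD lista i 0) 0

-- ===== PRECONDITION & SPEC =====
def Spec_calcularSuma (lista : List Int) (out : Int) : Prop := out = calcularSuma_alt lista
instance (lista : List Int) (out : Int) : Decidable (Spec_calcularSuma lista out) := by unfold Spec_calcularSuma; infer_instance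

-- ===== CLAIM (what is proved, stated in full; the proofs are below) =====
def Claim_equal_calcularSuma : Prop := ∀ (lista : List Int), Dom_calcularSuma lista → Spec_calcularSuma lista (calcularSuma lista)

-- ===== LEMMAS AND PROOFS =====

-- membership in A's skip list characterised by a 13 at a neighboring index
lemma mem_saltar_iff (lista : List Int) (m : Int) :
    (m ∈ (((PySem.List.enumerate lista).filter (fun p => p.2 == 13)).map (fun p => p.1)).foldl
        (fun acc k => acc ++ [k - 1] ++ [k] ++ [k + 1]) []) ↔
    ∃ (k : Nat) (h : k < lista.length), lista[k] = 13 ∧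
      (m = (k : Int) - 1 ∨ m = (k : Int) ∨ m = (k : Int) + 1) := by
  have h1 : ∀ (l : List Int) (acc : List Int),
      l.foldl (fun acc k => acc ++ [k - 1] ++ [k] ++ [k + 1]) acc
        = acc ++ l.flatMap (fun k => [k - 1, k, k + 1]) := by
    intro l
    induction l with
    | nil => intro acc; simp
    | cons a t ih => intro acc; simp [List.foldl_cons, List.append_assoc, List.flatMap]
  rw [h1]
  simp only [List.nil_append, List.mem_flatMap, List.mem_map, List.mem_filter]
  constructor
  · rintro ⟨k, ⟨⟨p, ⟨hp, h13⟩, rfl⟩, hm⟩⟩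
    rw [PySem.List.mem_enumerate_iff _ _ _] at hp
    obtain ⟨j, hj, rfl⟩ := hp
    refine ⟨j, hj, by simpa using h13, ?_⟩
    simp only [List.mem_cons, List.not_mem_nil, or_false] at hm
    simpa using hm
  · rintro ⟨k, hk, h13, hm⟩
    refine ⟨(k : Int), ⟨⟨((k : Int), lista[k]), ?_, rfl⟩, ?_⟩⟩
    · exact ⟨(PySem.List.mem_enumerate_iff _ _ _).2 ⟨k, hk, by simp⟩, by simpa using h13⟩
    · simp only [List.mem_cons, List.not_mem_nil, or_false]
      tauto

theorem calcularSuma_spec : Claim_equal_calcularSuma := by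
  intro lista _
  unfold Spec_calcularSuma calcularSuma calcularSuma_alt
  apply PySem.List.foldl_congr_mem
  intro acc i hi
  rw [PySem.List.mem_pyRange_one] at hi
  obtain ⟨h0, hn⟩ := hi
  have hmem := mem_saltar_iff lista i
  by_cases hskip : i ∈ (((PySem.List.enumerate lista).filter (fun p => p.2 == 13)).map (fun p => p.1)).foldl
      (fun acc k => acc ++ [k - 1] ++ [k] ++ [k + 1]) []
  · rw [if_pos hskip]
    obtain ⟨k, hk, h13, hcase⟩ := hmem.1 hskip
    have : ((PySem.List.pyGetD lista i 0 == 13)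
        || (decide (i > 0) && (PySem.List.pyGetD lista (i - 1) 0 == 13))
        || (decide (i < (lista.length : Int) - 1) && (PySem.List.pyGetD lista (i + 1) 0 == 13))) = true := by
      rcases hcase with h | h | h
      · -- i = k - 1, so lista[i+1] = 13 and i < len - 1
        have hi1 : i + 1 = (k : Int) := by omega
        have hlt : i < (lista.length : Int) - 1 := by omega
        have : PySem.List.pyGetD lista (i + 1) 0 = 13 := by
          rw [hi1]; rw [PySem.List.pyGetD_eq_getElem lista 0 (by omega) (by exact_mod_cast hk)]
          simpa using h13
        simp [this, hlt]
      · -- i = k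
        have : PySem.List.pyGetD lista i 0 = 13 := by
          rw [h]; rw [PySem.List.pyGetD_eq_getElem lista 0 (by omega) (by exact_mod_cast hk)]
          simpa using h13
        simp [this]
      · -- i = k + 1, so lista[i-1] = 13 and i > 0
        have hi1 : i - 1 = (k : Int) := by omega
        have hgt : i > 0 := by omega
        have : PySem.List.pyGetD lista (i - 1) 0 = 13 := by
          rw [hi1]; rw [PySem.List.pyGetD_eq_getElem lista 0 (by omega) (by exact_mod_cast hk)]
          simpa using h13
        simp [this, hgt]
    simp only [this, if_true]
  · rw [if_neg hskip]
    have : ((PySem.List.pyGetD lista i 0 == 13)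
        || (decide (i > 0) && (PySem.List.pyGetD lista (i - 1) 0 == 13))
        || (decide (i < (lista.length : Int) - 1) && (PySem.List.pyGetD lista (i + 1) 0 == 13))) = false := by
      by_contra hcon
      apply hskip
      apply hmem.2
      simp only [Bool.not_eq_false, Bool.or_eq_true, Bool.and_eq_true, beq_iff_eq,
        decide_eq_true_eq] at hcon
      rcases hcon with (h | ⟨hgt, h⟩) | ⟨hlt, h⟩
      · refine ⟨i.toNat, by omega, ?_, Or.inr (Or.inl (by omega))⟩
        rw [PySem.List.pyGetD_eq_getElem lista 0 h0 hn] at h; exact h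
      · refine ⟨(i - 1).toNat, by omega, ?_, Or.inr (Or.inr (by omega))⟩
        rw [PySem.List.pyGetD_eq_getElem lista 0 (show (0:Int) ≤ i - 1 by omega) (show i - 1 < (lista.length:Int) by omega)] at h; exact h
      · refine ⟨(i + 1).toNat, by omega, ?_, Or.inl (by omega)⟩
        rw [PySem.List.pyGetD_eq_getElem lista 0 (show (0:Int) ≤ i + 1 by omega) (show i + 1 < (lista.length:Int) by omega)] at h; exact h
    simp [this]
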